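-- pv_equiv track=rewrite | github.com/jd-kowal/KyberPQC | kyber_lib.py | generate_zetas
-- ===== SOURCE A (Python) =====
-- Q = 3329
--
-- def generate_zetas(root=17):
--     zetas = [0] * 128
--     powers = [pow(root, i, Q) for i in range(128)]
--     for i in range(128):
--         rev = 0
--         tmp = i
--         for _ in range(7):
--             rev = (rev << 1) | (tmp & 1)
--             tmp >>= 1
--         zetas[rev] = powers[i]
--     return zetas
-- ===== SOURCE B (Python) =====
-- Q = 3329
--
-- def generate_zetas(root=17):
--     # Doubling construction: no bit-reversal computation and no pow() at all.
--     # Invariant: after k rounds, vals lists root^e % Q for the k-bit exponents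
--     # in bit-reversed order, because the bit-reversed order of (k+1)-bit numbers
--     # is [2e for e in order_k] + [2e+1 for e in order_k]; squaring doubles the
--     # exponent, one extra multiply by root adds one.
--     vals = [1]
--     for _ in range(7):
--         vals = [v * v % Q for v in vals] + [v * v * root % Q for v in vals]
--     return vals
-- ===== Notes on version B (the rewrite author's own statement) =====
-- stated objective: alternative
-- what changed: B replaces A's modpow table plus bit-reversal scatter with a doubling construction: starting from [1], seven rounds of vals -> [v*v%Q] ++ [v*v*root%Q] generate the table directly in bit-reversed order, with no pow() and no bit manipulation at all.
import Mathlib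
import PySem

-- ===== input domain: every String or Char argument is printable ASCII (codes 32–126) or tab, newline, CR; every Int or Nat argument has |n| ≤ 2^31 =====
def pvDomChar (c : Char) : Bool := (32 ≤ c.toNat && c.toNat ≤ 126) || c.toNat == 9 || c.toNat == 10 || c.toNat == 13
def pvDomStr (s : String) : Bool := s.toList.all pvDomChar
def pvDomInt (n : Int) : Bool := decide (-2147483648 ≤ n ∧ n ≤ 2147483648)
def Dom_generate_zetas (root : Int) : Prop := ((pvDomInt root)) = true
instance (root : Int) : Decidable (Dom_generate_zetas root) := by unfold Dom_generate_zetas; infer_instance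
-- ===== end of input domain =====

-- B replaces A's modpow table + bit-reversal scatter by a doubling construction
-- (seven rounds of vals -> squares ++ squares*root), which yields the table directly
-- in bit-reversed order (objective: alternative).


-- ===== PORT A =====
-- A's 7-step bit-reversal loop on a loop index i
-- (i comes from range(128), so i ≥ 0: '& 1' is mod 2, '>> 1' is floordiv 2, '<< 1 |' is *2 +; exact there)
def pvBitrev7 (i : Int) : Int :=
  ((List.range 7).foldl (fun (s : Int × Int) _ =>
      (s.1 * 2 + PySem.Int.mod s.2 2, PySem.Int.floordiv s.2 2)) (0, i)).1

def generate_zetas (root : Int) : List Int :=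
  let zetas : List Int := List.replicate 128 0
  let powers : List Int :=
    (PySem.List.pyRange 0 128 1).map (fun i => PySem.Int.powMod root i.toNat 3329)
  -- zetas[rev] = powers[i]; rev and i are always in [0,128), so .set/.pyGetD are exact here
  (PySem.List.pyRange 0 128 1).foldl (fun zetas i =>
    let rev := pvBitrev7 i
    zetas.set rev.toNat (PySem.List.pyGetD powers i 0)) zetas

-- ===== PORT B =====
def generate_zetas_alt (root : Int) : List Int :=
  (PySem.List.pyRange 0 7 1).foldl (fun vals _ =>
    vals.map (fun v => PySem.Int.mod (v * v) 3329) ++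
    vals.map (fun v => PySem.Int.mod (v * v * root) 3329)) [1]

-- ===== PRECONDITION & SPEC =====
def Spec_generate_zetas (root : Int) (out : List Int) : Prop := out = generate_zetas_alt root
instance (root : Int) (out : List Int) : Decidable (Spec_generate_zetas root out) := by unfold Spec_generate_zetas; infer_instance

-- ===== CLAIM =====
def Claim_equal_generate_zetas : Prop := ∀ (root : Int), Dom_generate_zetas root → Spec_generate_zetas root (generate_zetas root)

-- ===== LEMMAS AND PROOFS =====

-- the bit-reversal as a function on Nat indices
def pvBrev (n : Nat) : Nat := (pvBitrev7 (n : Int)).toNat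

set_option maxRecDepth 4000 in
lemma pvBrev_lt : ∀ n < 128, pvBrev n < 128 := by decide

set_option maxRecDepth 4000 in
lemma pvBrev_invol : ∀ n < 128, pvBrev (pvBrev n) = n := by decide

lemma scatter_length (g : Nat → Int) (l : List Nat) (z : List Int) :
    (l.foldl (fun z i => z.set (pvBrev i) (g i)) z).length = z.length := by
  induction l generalizing z with
  | nil => rfl
  | cons i l ih => simpa using ih (z.set (pvBrev i) (g i))

lemma scatter_getElem? (g : Nat → Int) (l : List Nat) (z : List Int)
    (hz : z.length = 128) (hl : ∀ i ∈ l, i < 128) (j : Nat) (hj : j < 128) :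
    (l.foldl (fun z i => z.set (pvBrev i) (g i)) z)[j]? =
      if pvBrev j ∈ l then some (g (pvBrev j)) else z[j]? := by
  induction l generalizing z with
  | nil => simp
  | cons i l ih =>
    have hi : i < 128 := hl i (List.mem_cons_self)
    have hz' : (z.set (pvBrev i) (g i)).length = 128 := by simpa using hz
    have hrec := ih (z.set (pvBrev i) (g i)) hz' (fun x hx => hl x (List.mem_cons_of_mem _ hx))
    simp only [List.foldl_cons, hrec]
    by_cases hmem : pvBrev j ∈ l
    · simp [hmem]
    · by_cases hij : i = pvBrev j
      · have hbj : pvBrev i = j := by rw [hij, pvBrev_invol j hj]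
        have : pvBrev j ∈ i :: l := by rw [← hij]; exact List.mem_cons_self
        simp only [hmem, if_false, this, if_true, hbj]
        rw [List.getElem?_set_self (by omega), hij]
      · have hne : pvBrev i ≠ j := by
          intro h
          exact hij (by rw [← h, pvBrev_invol i hi])
        have hnm : pvBrev j ∉ (i :: l) := by
          intro h
          rcases List.mem_cons.mp h with h | h
          · exact hij h.symm
          · exact hmem h
        simp only [hmem, if_false, hnm]
        exact List.getElem?_set_ne hne

-- A's result, rewritten to the Nat-indexed scatter form
lemma portA_eq (root : Int) :
    generate_zetas root =
      (List.range 128).foldl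
        (fun z k => z.set (pvBrev k) (PySem.Int.powMod root k 3329))
        (List.replicate 128 0) := by
  unfold generate_zetas
  rw [show (128 : Int) = ((128 : Nat) : Int) from rfl,
      PySem.List.pyRange_zero_natCast 128, List.foldl_map]
  refine PySem.List.foldl_congr_mem _ _ _ _ ?_
  intro z k hk
  have hk' : k < 128 := List.mem_range.mp hk
  rw [List.map_map,
      PySem.List.pyGetD_of_nonneg _ _ (by positivity),
      Int.toNat_natCast,
      PySem.List.getD_map_range _ 128 k _ hk']
  simp [pvBrev]

-- ===== B side: the doubling construction =====

-- the exponent-list doubling that mirrors one round of B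
def pvDbl (E : List Nat) : List Nat :=
  E.map (fun e => 2 * e) ++ E.map (fun e => 2 * e + 1)

lemma pw_mod (a : Int) : PySem.Int.mod a 3329 = a % 3329 :=
  PySem.Int.mod_eq_emod_of_pos (by norm_num)

lemma pw_sq (root : Int) (e : Nat) :
    PySem.Int.mod (PySem.Int.powMod root e 3329 * PySem.Int.powMod root e 3329) 3329 =
      PySem.Int.powMod root (2 * e) 3329 := by
  show PySem.Int.mod (PySem.Int.mod (root ^ e) 3329 * PySem.Int.mod (root ^ e) 3329) 3329 =
      PySem.Int.mod (root ^ (2 * e)) 3329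
  rw [pw_mod, pw_mod, pw_mod, ← Int.mul_emod, two_mul, pow_add]

lemma pw_sq_mul (root : Int) (e : Nat) :
    PySem.Int.mod (PySem.Int.powMod root e 3329 * PySem.Int.powMod root e 3329 * root) 3329 =
      PySem.Int.powMod root (2 * e + 1) 3329 := by
  show PySem.Int.mod (PySem.Int.mod (root ^ e) 3329 * PySem.Int.mod (root ^ e) 3329 * root) 3329 =
      PySem.Int.mod (root ^ (2 * e + 1)) 3329
  rw [pw_mod, pw_mod, pw_mod]
  conv_rhs => rw [pow_succ, two_mul, pow_add]
  rw [Int.mul_emod (root ^ e * root ^ e) root, Int.mul_emod (root ^ e) (root ^ e),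
      Int.mul_emod (root ^ e % 3329 * (root ^ e % 3329)) root]

-- one round of B maps the doubled exponent list through powMod
lemma pvRound_eq (root : Int) (E : List Nat) :
    (E.map (fun e => PySem.Int.powMod root e 3329)).map (fun v => PySem.Int.mod (v * v) 3329) ++
      (E.map (fun e => PySem.Int.powMod root e 3329)).map (fun v => PySem.Int.mod (v * v * root) 3329) =
      (pvDbl E).map (fun e => PySem.Int.powMod root e 3329) := by
  unfold pvDbl
  rw [List.map_append, List.map_map, List.map_map, List.map_map, List.map_map]
  congr 1
  · exact List.map_congr_left (fun e _ => pw_sq root e)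
  · exact List.map_congr_left (fun e _ => pw_sq_mul root e)

-- the fold of B stays a powMod image of the exponent fold
lemma foldB_eq (root : Int) (l : List Int) (E : List Nat) :
    l.foldl (fun vals _ =>
        vals.map (fun v => PySem.Int.mod (v * v) 3329) ++
        vals.map (fun v => PySem.Int.mod (v * v * root) 3329))
      (E.map (fun e => PySem.Int.powMod root e 3329)) =
      (l.foldl (fun E _ => pvDbl E) E).map (fun e => PySem.Int.powMod root e 3329) := by
  induction l generalizing E with
  | nil => rfl
  | cons x l ih => rw [List.foldl_cons, pvRound_eq root E]; exact ih (pvDbl E)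

set_option maxRecDepth 4000 in
lemma exps_eq :
    (PySem.List.pyRange 0 7 1).foldl (fun E _ => pvDbl E) [0] = (List.range 128).map pvBrev := by
  decide

-- B's result is the gather map in bit-reversed order
lemma portB_eq (root : Int) :
    generate_zetas_alt root =
      (List.range 128).map (fun k => PySem.Int.powMod root (pvBrev k) 3329) := by
  unfold generate_zetas_alt
  have hbase : ([1] : List Int) = [(0 : Nat)].map (fun e => PySem.Int.powMod root e 3329) := by
    show ([1] : List Int) = [PySem.Int.mod (root ^ 0) 3329]
    rw [pow_zero, pw_mod]; norm_num
  rw [hbase, foldB_eq root _ [0], exps_eq, List.map_map]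
  rfl

-- ===== VERDICT =====
theorem generate_zetas_spec : Claim_equal_generate_zetas := by
  intro root _
  unfold Spec_generate_zetas
  rw [portA_eq, portB_eq]
  apply List.ext_getElem?
  intro j
  by_cases hj : j < 128
  · rw [scatter_getElem? _ _ _ (by simp) (fun i hi => List.mem_range.mp hi) j hj]
    have hmem : pvBrev j ∈ List.range 128 := List.mem_range.mpr (pvBrev_lt j hj)
    rw [if_pos hmem, List.getElem?_map, List.getElem?_range hj]
    rfl
  · have h1 : ((List.range 128).foldl
        (fun z k => z.set (pvBrev k) (PySem.Int.powMod root k 3329))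
        (List.replicate 128 0)).length = 128 := by
      rw [scatter_length]; simp
    rw [List.getElem?_eq_none (by omega), List.getElem?_eq_none (by simp; omega)]
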